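-- pv_equiv track=rewrite | github.com/thekevinscott/coaxer | karat/tui/label_app.py | _truncate_to_width
-- ===== SOURCE A (Python) =====
-- def _truncate_to_width(s: str, max_width: int) -> str:
--     """Truncate a string to fit within max_width display columns."""
--     import unicodedata
--
--     width = 0
--     for i, ch in enumerate(s):
--         eaw = unicodedata.east_asian_width(ch)
--         char_w = 2 if eaw in ("W", "F") else 1
--         if width + char_w > max_width - 3:
--             return s[:i] + "..."
--         width += char_w
--     return s
-- ===== SOURCE B (Python) =====
-- def _truncate_to_width(s: str, max_width: int) -> str:
--     """Truncate a string to fit within max_width display columns."""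
--     import unicodedata
--
--     # Prefix table of cumulative display widths, then binary search for the
--     # first position whose cumulative width exceeds max_width - 3.
--     cum = []
--     total = 0
--     for ch in s:
--         total += 2 if unicodedata.east_asian_width(ch) in ("W", "F") else 1
--         cum.append(total)
--     t = max_width - 3
--     lo, hi = 0, len(s)
--     while lo < hi:
--         mid = (lo + hi) // 2
--         if cum[mid] <= t:
--             lo = mid + 1
--         else:
--             hi = mid
--     if lo == len(s):
--         return s
--     return s[:lo] + "..."
-- ===== Notes on version B (the rewrite author's own statement) =====
-- stated objective: alternative
-- what changed: Replaces A's single scan with early exit by a prefix table of cumulative display widths plus a hand-written binary search for the first position whose cumulative width exceeds max_width - 3.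
import Mathlib
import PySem

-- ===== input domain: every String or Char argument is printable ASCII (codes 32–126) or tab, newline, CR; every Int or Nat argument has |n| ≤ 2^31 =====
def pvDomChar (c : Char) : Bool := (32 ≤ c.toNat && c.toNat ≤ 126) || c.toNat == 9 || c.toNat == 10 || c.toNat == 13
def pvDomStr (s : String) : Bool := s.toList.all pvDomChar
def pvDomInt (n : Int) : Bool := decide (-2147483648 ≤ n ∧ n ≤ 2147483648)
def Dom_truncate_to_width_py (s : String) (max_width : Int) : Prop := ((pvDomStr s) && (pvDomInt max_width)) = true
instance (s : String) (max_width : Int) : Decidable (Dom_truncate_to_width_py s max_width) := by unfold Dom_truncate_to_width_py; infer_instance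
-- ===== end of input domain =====

-- B replaces A's early-exit scan with a prefix table of cumulative widths plus a binary
-- search for the first position exceeding max_width - 3 (alternative algorithm, same cost).


-- shared helper: unicodedata.east_asian_width(ch) in ("W","F"); exact on the ASCII/tab/newline/CR
-- domain (no such character is Wide or Fullwidth; W/F start well above U+1100)
def pvEAWide (c : Char) : Bool := decide (0x1100 ≤ c.toNat)

-- character display width: 2 if east-asian wide/fullwidth else 1
def pvCharW (c : Char) : Int := if pvEAWide c then 2 else 1

-- ===== PORT A =====
-- A's loop over enumerate(s): index i, running width; s[:i] with i a loop index (0 ≤ i) is take i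
def pyTruncGo (s : String) (max_width : Int) (full : List Char) :
    List Char → Nat → Int → String
  | [], _, _ => s
  | ch :: tl, i, width =>
      let char_w := pvCharW ch
      if width + char_w > max_width - 3 then String.mk (full.take i) ++ "..."
      else pyTruncGo s max_width full tl (i + 1) (width + char_w)

def truncate_to_width_py (s : String) (max_width : Int) : String :=
  pyTruncGo s max_width s.toList s.toList 0 0

-- ===== PORT B =====
-- B's first loop: build the prefix table of cumulative widths
def pvBuildCum : List Char → Int → List Int
  | [], _ => []
  | c :: tl, total =>
      let t := total + pvCharW c
      t :: pvBuildCum tl t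

-- B's while-loop: binary search; cum[mid] with 0 ≤ lo ≤ mid < hi ≤ len is an in-range index
def pvBSearch (cum : List Int) (t : Int) (lo hi : Nat) : Nat :=
  if h : lo < hi then
    let mid := (lo + hi) / 2
    if cum.getD mid 0 ≤ t then pvBSearch cum t (mid + 1) hi
    else pvBSearch cum t lo mid
  else lo
termination_by hi - lo
decreasing_by all_goals omega

def truncate_to_width_py_alt (s : String) (max_width : Int) : String :=
  let cs := s.toList
  let cum := pvBuildCum cs 0
  let lo := pvBSearch cum (max_width - 3) 0 cs.length
  if lo = cs.length then s
  else String.mk (cs.take lo) ++ "..."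

-- ===== PRECONDITION & SPEC =====
def Spec_truncate_to_width_py (s : String) (max_width : Int) (out : String) : Prop := out = truncate_to_width_py_alt s max_width
instance (s : String) (max_width : Int) (out : String) : Decidable (Spec_truncate_to_width_py s max_width out) := by unfold Spec_truncate_to_width_py; infer_instance

-- ===== CLAIM (what is proved, stated in full; the proofs are below) =====
def Claim_equal_truncate_to_width_py : Prop := ∀ (s : String) (max_width : Int), Dom_truncate_to_width_py s max_width → Spec_truncate_to_width_py s max_width (truncate_to_width_py s max_width)

-- ===== LEMMAS AND PROOFS =====

-- partial sum of the first i character widths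
def pvPsum (cs : List Char) (i : Nat) : Int := ((cs.take i).map pvCharW).sum

lemma pvCharW_pos (c : Char) : 0 < pvCharW c := by
  unfold pvCharW; split <;> norm_num

lemma length_buildCum (cs : List Char) (b : Int) : (pvBuildCum cs b).length = cs.length := by
  induction cs generalizing b with
  | nil => rfl
  | cons c tl ih => simp [pvBuildCum, ih]

lemma pvPsum_succ (cs : List Char) (i : Nat) (h : i < cs.length) :
    pvPsum cs (i + 1) = pvPsum cs i + pvCharW cs[i] := by
  have h1 : cs.take (i + 1) = cs.take i ++ [cs[i]] := by
    rw [List.take_succ, List.getElem?_eq_getElem h]; rfl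
  unfold pvPsum
  rw [h1, List.map_append, List.sum_append]
  simp

lemma getD_buildCum (cs : List Char) (b : Int) (j : Nat) (h : j < cs.length) :
    (pvBuildCum cs b).getD j 0 = b + pvPsum cs (j + 1) := by
  induction cs generalizing b j with
  | nil => simp at h
  | cons c tl ih =>
    cases j with
    | zero => simp [pvBuildCum, pvPsum, List.take]
    | succ j =>
      have hj : j < tl.length := by simpa using h
      have hrec := ih (b + pvCharW c) j hj
      have hps : pvPsum (c :: tl) (j + 1 + 1) = pvCharW c + pvPsum tl (j + 1) := by
        unfold pvPsum; simp [List.take]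
      simp only [pvBuildCum, List.getD_cons_succ]
      rw [hrec, hps]; ring

lemma pvPsum_le_succ (cs : List Char) (j : Nat) : pvPsum cs j ≤ pvPsum cs (j + 1) := by
  by_cases hj : j < cs.length
  · rw [pvPsum_succ cs j hj]
    have := pvCharW_pos cs[j]
    omega
  · unfold pvPsum
    rw [List.take_of_length_le (by omega), List.take_of_length_le (by omega)]

lemma pvPsum_mono (cs : List Char) {i j : Nat} (h : i ≤ j) : pvPsum cs i ≤ pvPsum cs j := by
  induction j with
  | zero => have : i = 0 := by omega
            subst this; exact le_refl _
  | succ j ih =>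
    rcases Nat.eq_or_lt_of_le h with rfl | h'
    · exact le_refl _
    · exact le_trans (ih (by omega)) (pvPsum_le_succ cs j)

-- the index where A stops: first j with cumulative width > t (cs.length if none)
def pvStop (cs : List Char) (t : Int) : Nat :=
  (pvBuildCum cs 0).findIdx (fun x => decide (t < x))

lemma buildCum_getElem (cs : List Char) (j : Nat)
    (h : j < (pvBuildCum cs 0).length) :
    (pvBuildCum cs 0)[j] = pvPsum cs (j + 1) := by
  have hj : j < cs.length := by rwa [length_buildCum] at h
  have := getD_buildCum cs 0 j hj
  rw [List.getD_eq_getElem _ 0 h] at this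
  simpa using this

lemma pvStop_le (cs : List Char) (t : Int) : pvStop cs t ≤ cs.length := by
  unfold pvStop
  have := List.findIdx_le_length (p := fun x : Int => decide (t < x)) (xs := pvBuildCum cs 0)
  rwa [length_buildCum] at this

lemma pvStop_spec_lt (cs : List Char) (t : Int) {j : Nat}
    (h : j < pvStop cs t) : pvPsum cs (j + 1) ≤ t := by
  have hlen : j < (pvBuildCum cs 0).length := by
    have := pvStop_le cs t
    rw [length_buildCum]
    omega
  have hp := List.not_of_lt_findIdx (p := fun x : Int => decide (t < x)) (h : j < _)
  simp at hp
  have he : (pvBuildCum cs 0)[j]'hlen = pvPsum cs (j + 1) := buildCum_getElem cs j hlen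
  exact le_trans (le_of_eq he.symm) hp

lemma pvStop_hit (cs : List Char) (t : Int) (h : pvStop cs t < cs.length) :
    t < pvPsum cs (pvStop cs t + 1) := by
  have hlen : pvStop cs t < (pvBuildCum cs 0).length := by rwa [length_buildCum]
  have hp := List.findIdx_getElem (p := fun x : Int => decide (t < x))
      (xs := pvBuildCum cs 0) (w := hlen)
  simp at hp
  have he : (pvBuildCum cs 0)[pvStop cs t]'hlen = pvPsum cs (pvStop cs t + 1) :=
    buildCum_getElem cs _ hlen
  exact lt_of_lt_of_eq hp he

-- pvStop is pinned down by: everything below lo is ≤ t, everything from lo on is > t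
lemma pvStop_eq (cs : List Char) (t : Int) (lo : Nat)
    (hlo : ∀ j < lo, pvPsum cs (j + 1) ≤ t)
    (hhi : ∀ j, lo ≤ j → j < cs.length → t < pvPsum cs (j + 1))
    (hle : lo ≤ cs.length) : pvStop cs t = lo := by
  rcases Nat.lt_trichotomy (pvStop cs t) lo with h | h | h
  · exact absurd (pvStop_hit cs t (by omega)) (not_lt.mpr (hlo _ h))
  · exact h
  · have hlt : lo < cs.length := lt_of_lt_of_le h (pvStop_le cs t)
    exact absurd (hhi lo (le_refl _) hlt) (not_lt.mpr (pvStop_spec_lt cs t h))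

-- binary-search correctness on the monotone prefix table
lemma pvBSearch_eq (cs : List Char) (t : Int) :
    ∀ (n lo hi : Nat), hi - lo ≤ n →
    (∀ j < lo, pvPsum cs (j + 1) ≤ t) →
    (∀ j, hi ≤ j → j < cs.length → t < pvPsum cs (j + 1)) →
    lo ≤ hi → hi ≤ cs.length →
    pvBSearch (pvBuildCum cs 0) t lo hi = pvStop cs t := by
  intro n
  induction n with
  | zero =>
    intro lo hi hn hlo hhi h1 h2
    have : lo = hi := by omega
    subst this
    rw [pvBSearch]
    simp only [lt_irrefl, dif_neg, not_false_iff]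
    exact (pvStop_eq cs t lo hlo hhi (by omega)).symm
  | succ n ih =>
    intro lo hi hn hlo hhi h1 h2
    rw [pvBSearch]
    by_cases h : lo < hi
    · simp only [h, dif_pos]
      have hmid1 : lo ≤ (lo + hi) / 2 := by omega
      have hmid2 : (lo + hi) / 2 < hi := by omega
      have hmlen : (lo + hi) / 2 < cs.length := by omega
      rw [getD_buildCum cs 0 _ hmlen]
      by_cases hc : 0 + pvPsum cs ((lo + hi) / 2 + 1) ≤ t
      · simp only [hc, if_pos]
        refine ih ((lo + hi) / 2 + 1) hi (by omega) ?_ hhi (by omega) h2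
        intro j hj
        exact le_trans (pvPsum_mono cs (by omega : j + 1 ≤ (lo + hi) / 2 + 1)) (by simpa using hc)
      · simp only [hc, if_neg, not_false_iff]
        refine ih lo ((lo + hi) / 2) (by omega) hlo ?_ (by omega) (by omega)
        intro j hj hjl
        have : pvPsum cs ((lo + hi) / 2 + 1) ≤ pvPsum cs (j + 1) :=
          pvPsum_mono cs (by omega)
        omega
    · simp only [h, dif_neg, not_false_iff]
      have : lo = hi := by omega
      subst this
      exact (pvStop_eq cs t lo hlo hhi (by omega)).symm

-- A's loop computes the same truncation point
lemma pyTruncGo_eq (s : String) (mw : Int) (cs : List Char) :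
    ∀ (rest : List Char) (i : Nat), rest = cs.drop i → i ≤ cs.length →
    (∀ j < i, pvPsum cs (j + 1) ≤ mw - 3) →
    pyTruncGo s mw cs rest i (pvPsum cs i) =
      (if pvStop cs (mw - 3) = cs.length then s
       else String.mk (cs.take (pvStop cs (mw - 3))) ++ "...") := by
  intro rest
  induction rest with
  | nil =>
    intro i hdrop hi hbelow
    have hlen : i = cs.length := by
      have := congrArg List.length hdrop
      simp at this
      omega
    subst hlen
    have hstop : pvStop cs (mw - 3) = cs.length := by
      apply pvStop_eq cs (mw - 3) cs.length
      · exact hbelow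
      · intro j hj hjl; omega
      · exact le_refl _
    rw [pyTruncGo, if_pos hstop]
  | cons ch tl ih =>
    intro i hdrop hi hbelow
    have hilt : i < cs.length := by
      by_contra hge
      rw [List.drop_eq_nil_of_le (by omega)] at hdrop
      simp at hdrop
    have hcons : cs.drop i = cs[i] :: cs.drop (i + 1) := List.drop_eq_getElem_cons hilt
    rw [hcons] at hdrop
    injection hdrop with hch htl
    have hsum : pvPsum cs i + pvCharW ch = pvPsum cs (i + 1) := by
      rw [pvPsum_succ cs i hilt, hch]
    simp only [pyTruncGo, gt_iff_lt]
    by_cases hbr : mw - 3 < pvPsum cs i + pvCharW ch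
    · rw [if_pos hbr]
      have hstop : pvStop cs (mw - 3) = i := by
        apply pvStop_eq cs (mw - 3) i hbelow
        · intro j hj hjl
          have h1 : mw - 3 < pvPsum cs (i + 1) := by omega
          have h2 : pvPsum cs (i + 1) ≤ pvPsum cs (j + 1) := pvPsum_mono cs (by omega)
          omega
        · omega
      rw [hstop, if_neg (by omega)]
    · rw [if_neg hbr, hsum]
      apply ih (i + 1) htl (by omega)
      intro j hj
      rcases Nat.lt_or_ge j i with hj' | hj'
      · exact hbelow j hj'
      · have : j = i := by omega
        subst this
        omega

-- ===== VERDICT (by name: the statement is the Claim_ definition above) =====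
theorem truncate_to_width_py_spec : Claim_equal_truncate_to_width_py := by
  intro s mw _
  unfold Spec_truncate_to_width_py truncate_to_width_py truncate_to_width_py_alt
  have hb : pvBSearch (pvBuildCum s.toList 0) (mw - 3) 0 s.toList.length =
      pvStop s.toList (mw - 3) := by
    apply pvBSearch_eq s.toList (mw - 3) s.toList.length 0 s.toList.length
    · omega
    · intro j hj; omega
    · intro j hj hjl; omega
    · omega
    · exact le_refl _
  have ha := pyTruncGo_eq s mw s.toList s.toList 0 (by simp) (by omega) (by intro j hj; omega)
  have h0 : pvPsum s.toList 0 = 0 := rfl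
  rw [h0] at ha
  rw [ha]
  simp only [hb]
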